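-- pv_equiv track=rewrite | github.com/bailiang2020/HMS | scripts/utils/run_mask_sweep.py | extract_final_report
-- ===== SOURCE A (Python) =====
-- def extract_final_report(log_text: str) -> str:
--     marker = "Final Evaluation Report:"
--     idx = log_text.rfind(marker)
--     if idx == -1:
--         return ""
--
--     lines = log_text[idx + len(marker):].splitlines()
--     collected = []
--     started = False
--     for line in lines:
--         if not started and not line.strip():
--             continue
--         if line.strip():
--             started = True
--         if not started:
--             continue
--         collected.append(line.rstrip())
--         if "weighted avg" in line:
--             break
--     return "\n".join(collected).strip()
-- ===== SOURCE B (Python) =====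
-- def extract_final_report(log_text: str) -> str:
--     marker = "Final Evaluation Report:"
--     idx = log_text.rfind(marker)
--     if idx == -1:
--         return ""
--     lines = log_text[idx + len(marker):].splitlines()
--     start = next((i for i, ln in enumerate(lines) if ln.strip()), None)
--     if start is None:
--         return ""
--     rest = lines[start:]
--     end = next((j for j, ln in enumerate(rest) if "weighted avg" in ln), len(rest) - 1)
--     return "\n".join(ln.rstrip() for ln in rest[:end + 1]).strip()
-- ===== Notes on version B (the rewrite author's own statement) =====
-- stated objective: simpler
-- what changed: Replaces the stateful started-flag collection loop with explicit boundary finding: locate the index of the first non-blank line and of the first break-substring line after it, then slice that block, rstrip each line and join.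
import Mathlib
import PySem

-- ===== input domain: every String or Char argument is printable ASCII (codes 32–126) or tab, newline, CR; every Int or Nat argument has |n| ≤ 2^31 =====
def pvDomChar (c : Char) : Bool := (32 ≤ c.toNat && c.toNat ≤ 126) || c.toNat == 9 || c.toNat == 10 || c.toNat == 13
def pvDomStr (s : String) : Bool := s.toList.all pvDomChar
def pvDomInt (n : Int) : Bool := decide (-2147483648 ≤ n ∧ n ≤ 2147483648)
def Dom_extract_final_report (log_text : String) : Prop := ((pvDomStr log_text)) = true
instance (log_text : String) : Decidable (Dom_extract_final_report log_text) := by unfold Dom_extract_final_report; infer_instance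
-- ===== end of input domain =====

-- B replaces A's stateful started-flag loop with explicit boundary indices (first non-blank line, first break line) plus a slice — objective: simpler decomposition, same cost.

-- ===== PORT A =====
-- Python loop: skips leading blank lines (flag `started`), collects rstripped lines,
-- breaks on a line containing "weighted avg".
def pvLoopA : List String → Bool → List String → List String
  | [], _, collected => collected
  | line :: ls, started, collected =>
    if (!started) && (PySem.Str.strip line == "") then
      pvLoopA ls started collected
    else
      let started' := if !(PySem.Str.strip line == "") then true else started
      if started' = false then
        pvLoopA ls started' collected
      else
        let collected' := collected ++ [PySem.Str.rstrip line]
        if PySem.Str.isIn "weighted avg" line then collected'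
        else pvLoopA ls started' collected'

def extract_final_report (log_text : String) : String :=
  let marker := "Final Evaluation Report:"
  let idx := PySem.Str.rfind log_text marker
  if idx == -1 then ""
  else
    let lines := PySem.Str.splitlines (PySem.Str.slice log_text (some (idx + (PySem.Str.len marker : Int))) none)
    PySem.Str.strip (PySem.Str.join "\n" (pvLoopA lines false []))

-- ===== PORT B =====
def extract_final_report_alt (log_text : String) : String :=
  let marker := "Final Evaluation Report:"
  let idx := PySem.Str.rfind log_text marker
  if idx == -1 then ""
  else
    let lines := PySem.Str.splitlines (PySem.Str.slice log_text (some (idx + (PySem.Str.len marker : Int))) none)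
    match lines.findIdx? (fun ln => !(PySem.Str.strip ln == "")) with
    | none => ""
    | some start =>
      let rest := lines.drop start
      let stop := match rest.findIdx? (fun ln => PySem.Str.isIn "weighted avg" ln) with
        | some j => j
        | none => rest.length - 1
      PySem.Str.strip (PySem.Str.join "\n" ((rest.take (stop + 1)).map PySem.Str.rstrip))

-- ===== PRECONDITION & SPEC =====
def Spec_extract_final_report (log_text : String) (out : String) : Prop := out = extract_final_report_alt log_text
instance (log_text : String) (out : String) : Decidable (Spec_extract_final_report log_text out) := by unfold Spec_extract_final_report; infer_instance

-- ===== CLAIM (what is proved, stated in full; the proofs are below) =====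
def Claim_equal_extract_final_report : Prop := ∀ (log_text : String), Dom_extract_final_report log_text → Spec_extract_final_report log_text (extract_final_report log_text)

-- ===== LEMMAS AND PROOFS =====

-- B's collected block, as a function of the (already start-trimmed) line list.
def pvCollectB (ls : List String) : List String :=
  let stop := match ls.findIdx? (fun ln => PySem.Str.isIn "weighted avg" ln) with
    | some j => j
    | none => ls.length - 1
  (ls.take (stop + 1)).map PySem.Str.rstrip

lemma pvCollectB_cons (l : String) (ls : List String) :
    pvCollectB (l :: ls) =
      PySem.Str.rstrip l :: (if PySem.Str.isIn "weighted avg" l then [] else pvCollectB ls) := by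
  by_cases h : PySem.Str.isIn "weighted avg" l = true
  all_goals simp at h
  · simp [pvCollectB, List.findIdx?_cons, h]
  · simp only [pvCollectB, List.findIdx?_cons]
    cases hf : ls.findIdx? (fun ln => PySem.Str.isIn "weighted avg" ln) with
    | some j => simp [h]
    | none =>
      cases ls with
      | nil => simp
      | cons a as => simp [h]

lemma pvLoopA_true (ls : List String) (acc : List String) :
    pvLoopA ls true acc = acc ++ pvCollectB ls := by
  induction ls generalizing acc with
  | nil => simp [pvLoopA, pvCollectB]
  | cons l ls ih =>
    rw [pvCollectB_cons]
    by_cases h : PySem.Str.isIn "weighted avg" l = true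
    all_goals simp at h
    · simp [pvLoopA, h]
    · simp [pvLoopA, h, ih]

lemma pvLoopA_false (ls : List String) :
    pvLoopA ls false [] =
      (match ls.findIdx? (fun ln => !(PySem.Str.strip ln == "")) with
       | none => []
       | some s => pvCollectB (ls.drop s)) := by
  induction ls with
  | nil => simp [pvLoopA]
  | cons l ls ih =>
    by_cases h : (PySem.Str.strip l == "") = true
    · rw [show pvLoopA (l :: ls) false [] = pvLoopA ls false [] by simp [pvLoopA, h]]
      rw [ih]
      simp [List.findIdx?_cons, h]
      cases hf : ls.findIdx? (fun ln => !(PySem.Str.strip ln == "")) with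
      | some s => simp
      | none => simp
    · rw [show pvLoopA (l :: ls) false [] =
          (if PySem.Str.isIn "weighted avg" l then [PySem.Str.rstrip l]
           else pvLoopA ls true [PySem.Str.rstrip l]) by simp [pvLoopA, h]]
      simp only [List.findIdx?_cons, h, Bool.not_false, List.drop_zero, if_true, pvCollectB_cons]
      by_cases hw : PySem.Str.isIn "weighted avg" l = true
      all_goals simp at hw
      · simp [hw]
      · simp [hw, pvLoopA_true]

-- ===== VERDICT (by name: the statement is the Claim_ definition above) =====
set_option maxHeartbeats 1000000 in
theorem extract_final_report_spec : Claim_equal_extract_final_report := by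
  intro log_text _
  unfold Spec_extract_final_report
  show (if (PySem.Str.rfind log_text "Final Evaluation Report:" == -1) = true then ""
        else PySem.Str.strip (PySem.Str.join "\n" (pvLoopA (PySem.Str.splitlines (PySem.Str.slice log_text
          (some (PySem.Str.rfind log_text "Final Evaluation Report:" + (PySem.Str.len "Final Evaluation Report:" : Int))) none)) false []))) =
       (if (PySem.Str.rfind log_text "Final Evaluation Report:" == -1) = true then ""
        else match (PySem.Str.splitlines (PySem.Str.slice log_text
          (some (PySem.Str.rfind log_text "Final Evaluation Report:" + (PySem.Str.len "Final Evaluation Report:" : Int))) none)).findIdx? (fun ln => !(PySem.Str.strip ln == "")) with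
          | none => ""
          | some start =>
            PySem.Str.strip (PySem.Str.join "\n"
              ((((PySem.Str.splitlines (PySem.Str.slice log_text
                  (some (PySem.Str.rfind log_text "Final Evaluation Report:" + (PySem.Str.len "Final Evaluation Report:" : Int))) none)).drop start).take
                ((match ((PySem.Str.splitlines (PySem.Str.slice log_text
                    (some (PySem.Str.rfind log_text "Final Evaluation Report:" + (PySem.Str.len "Final Evaluation Report:" : Int))) none)).drop start).findIdx?
                    (fun ln => PySem.Str.isIn "weighted avg" ln) with
                  | some j => j
                  | none => ((PySem.Str.splitlines (PySem.Str.slice log_text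
                      (some (PySem.Str.rfind log_text "Final Evaluation Report:" + (PySem.Str.len "Final Evaluation Report:" : Int))) none)).drop start).length - 1) + 1)).map PySem.Str.rstrip)))
  generalize PySem.Str.splitlines (PySem.Str.slice log_text
      (some (PySem.Str.rfind log_text "Final Evaluation Report:" + (PySem.Str.len "Final Evaluation Report:" : Int))) none) = L
  by_cases hidx : (PySem.Str.rfind log_text "Final Evaluation Report:" == -1) = true
  · rw [if_pos hidx, if_pos hidx]
  · rw [if_neg hidx, if_neg hidx, pvLoopA_false]
    cases hf : L.findIdx? (fun ln => !(PySem.Str.strip ln == "")) with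
    | none => rfl
    | some s => rfl
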